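-- pv_equiv track=rewrite | github.com/Nahom-Derese/Competitive-Programing | Contests/A2SV/Contest III/C_Last_Digit_Quest.py | backtrack
-- ===== SOURCE A (Python) =====
-- def backtrack(summ, freq, idx):
--     if idx == 3:
--         return summ % 10 == 3
--
--     for i in freq.keys():
--         if freq[i]:
--             freq[i]-=1
--             if backtrack(summ+i, freq, idx+1):
--                 return True
--             freq[i]+=1
--
--     return False
-- ===== SOURCE B (Python) =====
-- def backtrack(summ, freq, idx):
--     # Collapse the keys into a per-residue (key mod 10) supply of picks, then
--     # search over how many picks to take from each of the 10 residue classes.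
--     need = 3 - idx
--     supply = [0] * 10
--     for key, cnt in freq.items():
--         supply[key % 10] += cnt
--     target = (3 - summ) % 10
--
--     def pick(r, k, s):
--         if k == 0:
--             return s % 10 == target
--         if r == 10:
--             return False
--         return any(pick(r + 1, k - t, s + t * r) for t in range(min(supply[r], k) + 1))
--
--     return pick(0, need, 0)
-- ===== Notes on version B (the rewrite author's own statement) =====
-- stated objective: alternative
-- what changed: B never mutates freq: it compresses the dict in one pass into a per-residue (key mod 10) supply, then searches count vectors over the 10 fixed residue classes, instead of A's mutating depth-first search that branches over all keys at every level; Pre_ restricts freq to its natural domain as a frequency map (distinct keys, counts >= 0) since on a negative count A's truthiness test accidentally treats it as unlimited supply (and for idx > 3 recurses forever). …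
-- outside the precondition, e.g. on backtrack(0, {1: -2}, 0): A returns True, B returns False
import Mathlib
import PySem

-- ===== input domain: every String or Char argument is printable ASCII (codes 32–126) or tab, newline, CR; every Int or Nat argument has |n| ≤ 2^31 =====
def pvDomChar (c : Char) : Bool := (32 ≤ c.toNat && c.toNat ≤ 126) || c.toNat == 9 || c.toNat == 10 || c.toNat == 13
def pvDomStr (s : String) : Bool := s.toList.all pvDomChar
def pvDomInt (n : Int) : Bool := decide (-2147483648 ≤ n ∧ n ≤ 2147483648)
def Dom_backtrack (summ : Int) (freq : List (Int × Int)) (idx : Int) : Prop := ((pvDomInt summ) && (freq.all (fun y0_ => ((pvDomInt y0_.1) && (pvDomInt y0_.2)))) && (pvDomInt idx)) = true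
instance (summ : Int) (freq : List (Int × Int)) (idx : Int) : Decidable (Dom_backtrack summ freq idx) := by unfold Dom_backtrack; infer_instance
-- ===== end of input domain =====

-- B replaces A's mutating depth-first search over keys with a one-pass compression of the
-- frequency map into per-residue (key mod 10) supplies, then a search over how many picks
-- to take from each of the 10 residue classes (equivalence is about the return value; the
-- Python A also mutates freq in place when it returns True, B never mutates).
-- ===== PORT A =====
-- Port of A (return value only: the Python mutates `freq` in place but restores it on every
-- failing branch, so each loop iteration sees the original dict; a successful branch returns
-- immediately, leaving the return value unaffected by the mutation).
-- The dict ops are hand-ported as first-match association-list ops; exact here because a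
-- Python dict's key list has no duplicates (stated in Pre_).

-- freq[i]
def pvDGet (freq : List (Int × Int)) (k : Int) : Int :=
  match freq with
  | [] => 0   -- unreachable: `k` is always one of freq's keys at the call site
  | (a, c) :: rest => if a = k then c else pvDGet rest k

-- freq[i] = v
def pvDSet (freq : List (Int × Int)) (k : Int) (v : Int) : List (Int × Int) :=
  match freq with
  | [] => []
  | (a, c) :: rest => if a = k then (a, v) :: rest else (a, c) :: pvDSet rest k v

-- The `idx > 3` branch is a totalization guard only: for idx > 3 the Python never reaches its
-- base case; with all counts ≥ 0 (Pre_) it exhausts them and returns False — the guard's value —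
-- while with a negative count it recurses without bound (outside Pre_).
def backtrack (summ : Int) (freq : List (Int × Int)) (idx : Int) : Bool :=
  if _h3 : idx = 3 then decide (PySem.Int.mod summ 10 = 3)
  else if _hgt : 3 < idx then false   -- totalization guard (see above)
  else
    (freq.map Prod.fst).any fun i =>
      let c := pvDGet freq i
      decide (c ≠ 0) && backtrack (summ + i) (pvDSet freq i (c - 1)) (idx + 1)
termination_by (3 - idx).toNat
decreasing_by omega

-- ===== PORT B =====
-- helper `pick` of Source B; Python tests `r == 10`, ported as `10 ≤ r` for termination
-- (identical on every reachable call: r only steps 0,1,…,10).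
def pvPick (supply : List Int) (target : Int) (r : Nat) (k : Int) (s : Int) : Bool :=
  if k = 0 then decide (PySem.Int.mod s 10 = target)
  else if _h : 10 ≤ r then false
  else
    (PySem.List.pyRange 0 (min supply[r]! k + 1) 1).any fun t =>
      pvPick supply target (r + 1) (k - t) (s + t * (r : Int))
termination_by 10 - r
decreasing_by omega

def backtrack_alt (summ : Int) (freq : List (Int × Int)) (idx : Int) : Bool :=
  let need := 3 - idx
  let supply := freq.foldl
    (fun sup kv =>
      let r := (PySem.Int.mod kv.1 10).toNat
      sup.set r (sup[r]! + kv.2))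
    (List.replicate 10 0)
  let target := PySem.Int.mod (3 - summ) 10
  pvPick supply target 0 need 0

-- ===== PRECONDITION & SPEC =====
-- Pre_ restricts freq to its natural domain as a frequency map: distinct keys (freq is a
-- Python dict, whose items cannot repeat a key) and counts ≥ 0 (on a negative count A's
-- truthiness test `if freq[i]:` accidentally treats it as unlimited supply, decrementing it
-- without bound — and for idx > 3 that recursion never terminates).  No condition on idx.
def Pre_backtrack (summ : Int) (freq : List (Int × Int)) (idx : Int) : Prop :=
  (freq.map Prod.fst).Nodup ∧ ∀ kv ∈ freq, 0 ≤ kv.2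
instance (summ : Int) (freq : List (Int × Int)) (idx : Int) : Decidable (Pre_backtrack summ freq idx) := by
  unfold Pre_backtrack; infer_instance

def pvWitness_backtrack : Int × (List (Int × Int)) × Int := (0, [(1, 2), (2, 1)], 0)

def Spec_backtrack (summ : Int) (freq : List (Int × Int)) (idx : Int) (out : Bool) : Prop := out = backtrack_alt summ freq idx
instance (summ : Int) (freq : List (Int × Int)) (idx : Int) (out : Bool) : Decidable (Spec_backtrack summ freq idx out) := by unfold Spec_backtrack; infer_instance

-- ===== CLAIM (what is proved, stated in full; the proofs are below) =====
def Claim_equal_backtrack : Prop := ∀ (summ : Int) (freq : List (Int × Int)) (idx : Int), Dom_backtrack summ freq idx → Pre_backtrack summ freq idx → Spec_backtrack summ freq idx (backtrack summ freq idx)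

-- ===== LEMMAS AND PROOFS =====

-- ==== common spec (A side) ====
def pvFeas : List (Int × Int) → List Nat → Prop
  | [], [] => True
  | kv :: fs, t :: ts => (kv.2 < 0 ∨ (t : Int) ≤ kv.2) ∧ pvFeas fs ts
  | _, _ => False

def pvWsum : List (Int × Int) → List Nat → Int
  | kv :: fs, t :: ts => (t : Int) * kv.1 + pvWsum fs ts
  | _, _ => 0

def pvGood (freq : List (Int × Int)) (n : Nat) (summ : Int) : Prop :=
  ∃ ts : List Nat, pvFeas freq ts ∧ ts.sum = n ∧ PySem.Int.mod (summ + pvWsum freq ts) 10 = 3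

-- ==== small structural lemmas ====
theorem pv_dget_append (F1 F2 : List (Int × Int)) (i c : Int) (h : i ∉ F1.map Prod.fst) :
    pvDGet (F1 ++ (i, c) :: F2) i = c := by
  induction F1 with
  | nil => simp [pvDGet]
  | cons kv fs ih =>
    rw [List.map_cons, List.mem_cons, not_or] at h
    simp [pvDGet, Ne.symm h.1, ih h.2]

theorem pv_dset_append (F1 F2 : List (Int × Int)) (i c v : Int) (h : i ∉ F1.map Prod.fst) :
    pvDSet (F1 ++ (i, c) :: F2) i v = F1 ++ (i, v) :: F2 := by
  induction F1 with
  | nil => simp [pvDSet]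
  | cons kv fs ih =>
    rw [List.map_cons, List.mem_cons, not_or] at h
    simp [pvDSet, Ne.symm h.1, ih h.2]

theorem pv_feas_len : ∀ (f : List (Int × Int)) (ts : List Nat), pvFeas f ts → ts.length = f.length := by
  intro f
  induction f with
  | nil => intro ts h; cases ts with
    | nil => rfl
    | cons t ts => simp [pvFeas] at h
  | cons kv fs ih => intro ts h; cases ts with
    | nil => simp [pvFeas] at h
    | cons t ts => simpa using ih ts h.2

theorem pv_feas_split (F1 : List (Int × Int)) (kc : Int × Int) (F2 : List (Int × Int)) :
    ∀ ts, pvFeas (F1 ++ kc :: F2) ts →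
    ∃ (T1 : List Nat) (t : Nat) (T2 : List Nat), ts = T1 ++ t :: T2 ∧ T1.length = F1.length ∧ pvFeas F1 T1 ∧
      (kc.2 < 0 ∨ (t : Int) ≤ kc.2) ∧ pvFeas F2 T2 := by
  induction F1 with
  | nil =>
    intro ts h
    cases ts with
    | nil => simp [pvFeas] at h
    | cons t ts => exact ⟨[], t, ts, by simp, by simp, trivial, h.1, h.2⟩
  | cons kv fs ih =>
    intro ts h
    cases ts with
    | nil => simp [pvFeas] at h
    | cons t ts =>
      obtain ⟨T1, u, T2, hts, hlen, h1, hm, h2⟩ := ih ts h.2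
      exact ⟨t :: T1, u, T2, by rw [hts]; rfl, by simp [hlen], ⟨h.1, h1⟩, hm, h2⟩

theorem pv_feas_join (F1 : List (Int × Int)) (kc : Int × Int) (F2 : List (Int × Int)) :
    ∀ (T1 : List Nat) (t : Nat) (T2 : List Nat), pvFeas F1 T1 → (kc.2 < 0 ∨ (t : Int) ≤ kc.2) → pvFeas F2 T2 →
    pvFeas (F1 ++ kc :: F2) (T1 ++ t :: T2) := by
  induction F1 with
  | nil =>
    intro T1 t T2 h1 hm h2
    cases T1 with
    | nil => exact ⟨hm, h2⟩
    | cons u T1 => simp [pvFeas] at h1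
  | cons kv fs ih =>
    intro T1 t T2 h1 hm h2
    cases T1 with
    | nil => simp [pvFeas] at h1
    | cons u T1 => exact ⟨h1.1, ih T1 t T2 h1.2 hm h2⟩

theorem pv_wsum_append (F1 : List (Int × Int)) (F2 : List (Int × Int)) :
    ∀ T1 T2, T1.length = F1.length →
    pvWsum (F1 ++ F2) (T1 ++ T2) = pvWsum F1 T1 + pvWsum F2 T2 := by
  induction F1 with
  | nil =>
    intro T1 T2 hlen
    rw [List.length_eq_zero_iff.mp hlen]
    simp [pvWsum]
  | cons kv fs ih =>
    intro T1 T2 hlen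
    cases T1 with
    | nil => simp at hlen
    | cons u T1 =>
      simp at hlen
      simp [pvWsum, ih T1 T2 hlen]
      ring

theorem pv_feas_zero : ∀ (f : List (Int × Int)), pvFeas f (List.replicate f.length 0) := by
  intro f
  induction f with
  | nil => trivial
  | cons kv fs ih => exact ⟨by omega, ih⟩

theorem pv_wsum_zero : ∀ (f : List (Int × Int)) (ts : List Nat), (∀ t ∈ ts, t = 0) → pvWsum f ts = 0 := by
  intro f
  induction f with
  | nil => intro ts h; cases ts <;> simp [pvWsum]
  | cons kv fs ih =>
    intro ts h
    cases ts with
    | nil => simp [pvWsum]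
    | cons t ts =>
      simp at h
      simp [pvWsum, h.1, ih ts h.2]

-- n = 0 characterisation
theorem pv_good_zero (freq : List (Int × Int)) (summ : Int) :
    pvGood freq 0 summ ↔ PySem.Int.mod summ 10 = 3 := by
  constructor
  · rintro ⟨ts, hf, hs, hm⟩
    have hz : ∀ t ∈ ts, t = 0 := List.sum_eq_zero_iff_forall_eq_nat.mp hs
    rwa [pv_wsum_zero freq ts hz, add_zero] at hm
  · intro h
    refine ⟨List.replicate freq.length 0, pv_feas_zero freq, by simp, ?_⟩
    rw [pv_wsum_zero freq _ (by simp), add_zero]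
    exact h

-- the pick-first / count-vector rotation
theorem pv_good_succ (freq : List (Int × Int)) (n : Nat) (summ : Int) :
    pvGood freq (n + 1) summ ↔
    ∃ (F1 : List (Int × Int)) (i c : Int) (F2 : List (Int × Int)), freq = F1 ++ (i, c) :: F2 ∧ c ≠ 0 ∧
      pvGood (F1 ++ (i, c - 1) :: F2) n (summ + i) := by
  constructor
  · rintro ⟨ts, hf, hs, hm⟩
    have hex : ∃ t ∈ ts, t ≠ 0 := by
      by_contra h
      simp only [not_exists, not_and, not_not] at h
      have := List.sum_eq_zero_iff_forall_eq_nat.mpr (by intro x hx; exact h x hx)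
      omega
    obtain ⟨t, htm, htne⟩ := hex
    obtain ⟨T1, T2, hts⟩ := List.mem_iff_append.mp htm
    subst hts
    -- split freq at the same position: freq = F1 ++ kc :: F2 with |F1| = |T1|
    have hlenf : (T1 ++ t :: T2).length = freq.length := pv_feas_len freq _ hf
    have hT1 : T1.length < freq.length := by simp at hlenf; omega
    obtain ⟨F1, G, hfr, hF1len⟩ : ∃ (F1 G : List (Int × Int)), freq = F1 ++ G ∧ F1.length = T1.length :=
      ⟨freq.take T1.length, freq.drop T1.length, (List.take_append_drop _ _).symm, List.length_take_of_le (by omega)⟩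
    cases G with
    | nil => exfalso; rw [hfr] at hlenf; simp at hlenf; omega
    | cons kc F2 =>
      subst hfr
      have hsp := pv_feas_split F1 kc F2 _ hf
      obtain ⟨T1', u, T2', heq, hlen', h1, hmid, h2⟩ := hsp
      -- T1' = T1 etc: lengths force the split to coincide
      obtain ⟨hA, hB⟩ := List.append_inj heq (by omega)
      rw [List.cons.injEq] at hB
      obtain ⟨hu, hC⟩ := hB
      subst hA; subst hu; subst hC
      obtain ⟨i, c⟩ := kc
      refine ⟨F1, i, c, F2, rfl, by simp at hmid ⊢; omega, T1 ++ (t-1) :: T2, ?_, ?_, ?_⟩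
      · exact pv_feas_join F1 (i, c-1) F2 T1 (t-1) T2 h1 (by simp at hmid ⊢; omega) h2
      · simp at hs ⊢; omega
      · rw [pv_wsum_append F1 ((i,c-1)::F2) T1 ((t-1)::T2) hlen']
        rw [pv_wsum_append F1 ((i,c)::F2) T1 (t::T2) hlen'] at hm
        simp only [pvWsum] at hm ⊢
        have harg : summ + i + (pvWsum F1 T1 + ((((t-1:Nat)):Int) * i + pvWsum F2 T2))
            = summ + (pvWsum F1 T1 + ((t:Int) * i + pvWsum F2 T2)) := by
          push_cast [Nat.cast_sub (by omega : 1 ≤ t)]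
          ring
        rw [harg]; exact hm
  · rintro ⟨F1, i, c, F2, rfl, hc, ts', hf', hs', hm'⟩
    obtain ⟨T1, u, T2, hts, hlen, h1, hmid, h2⟩ := pv_feas_split F1 (i, c-1) F2 ts' hf'
    subst hts
    refine ⟨T1 ++ (u+1) :: T2, pv_feas_join F1 (i,c) F2 T1 (u+1) T2 h1 (by simp at hmid ⊢; omega) h2, by simp at hs' ⊢; omega, ?_⟩
    rw [pv_wsum_append F1 ((i,c)::F2) T1 ((u+1)::T2) hlen]
    rw [pv_wsum_append F1 ((i,c-1)::F2) T1 (u::T2) hlen] at hm'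
    simp only [pvWsum] at hm' ⊢
    have harg : summ + (pvWsum F1 T1 + ((((u+1:Nat)):Int) * i + pvWsum F2 T2))
        = summ + i + (pvWsum F1 T1 + ((u:Int) * i + pvWsum F2 T2)) := by
      push_cast
      ring
    rw [harg]; exact hm'

theorem pv_nodup_middle_not_mem {F1 F2 : List (Int × Int)} {i c : Int}
    (hnd : ((F1 ++ (i, c) :: F2).map Prod.fst).Nodup) : i ∉ F1.map Prod.fst := by
  rw [List.map_append, List.map_cons, List.nodup_middle] at hnd
  intro hmem
  exact (List.nodup_cons.mp hnd).1 (List.mem_append.mpr (Or.inl hmem))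

theorem pv_A_char : ∀ (n : Nat) (summ : Int) (freq : List (Int × Int)) (idx : Int),
    idx ≤ 3 → (3 - idx).toNat = n → (freq.map Prod.fst).Nodup →
    (backtrack summ freq idx = true ↔ pvGood freq n summ) := by
  intro n
  induction n with
  | zero =>
    intro summ freq idx h3 hn hnd
    have hidx : idx = 3 := by omega
    subst hidx
    rw [backtrack]
    simp [pv_good_zero]
  | succ n ih =>
    intro summ freq idx h3 hn hnd
    have hidx3 : ¬ idx = 3 := by omega
    have hlt : ¬ 3 < idx := by omega
    rw [backtrack]
    simp only [hidx3, hlt, dite_false]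
    rw [List.any_eq_true, pv_good_succ]
    constructor
    · rintro ⟨i, hi, hp⟩
      simp only [Bool.and_eq_true, decide_eq_true_eq] at hp
      obtain ⟨hc0, hrec⟩ := hp
      obtain ⟨kv, hkv, hfst⟩ := List.mem_map.mp hi
      obtain ⟨F1, F2, rfl⟩ := List.mem_iff_append.mp hkv
      obtain ⟨i', c⟩ := kv
      simp only at hfst
      subst hfst
      have hnotin := pv_nodup_middle_not_mem hnd
      rw [pv_dget_append F1 F2 i' c hnotin] at hc0 hrec
      rw [pv_dset_append F1 F2 i' c _ hnotin] at hrec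
      have hnd' : ((F1 ++ (i', c - 1) :: F2).map Prod.fst).Nodup := by
        rw [List.map_append, List.map_cons] at hnd ⊢
        exact hnd
      rw [ih (summ + i') (F1 ++ (i', c - 1) :: F2) (idx + 1) (by omega) (by omega) hnd'] at hrec
      exact ⟨F1, i', c, F2, rfl, hc0, hrec⟩
    · rintro ⟨F1, i, c, F2, heq, hc, hgood⟩
      subst heq
      refine ⟨i, by simp, ?_⟩
      have hnotin := pv_nodup_middle_not_mem hnd
      simp only [pv_dget_append F1 F2 i c hnotin, pv_dset_append F1 F2 i c _ hnotin,
        Bool.and_eq_true, decide_eq_true_eq]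
      refine ⟨hc, ?_⟩
      have hnd' : ((F1 ++ (i, c - 1) :: F2).map Prod.fst).Nodup := by
        rw [List.map_append, List.map_cons] at hnd ⊢
        exact hnd
      rw [ih (summ + i) (F1 ++ (i, c - 1) :: F2) (idx + 1) (by omega) (by omega) hnd']
      exact hgood

-- ==== B side: residues, supplies, groupings ====
def pvRes (k : Int) : Nat := (PySem.Int.mod k 10).toNat

def pvSupSum : List (Int × Int) → Nat → Int
  | [], _ => 0
  | kv :: fs, r => (if pvRes kv.1 = r then kv.2 else 0) + pvSupSum fs r

def pvGsum : List (Int × Int) → List Nat → Nat → Nat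
  | kv :: fs, t :: ts, r => (if pvRes kv.1 = r then t else 0) + pvGsum fs ts r
  | _, _, _ => 0

def pvWres : List (Int × Int) → List Nat → Int
  | kv :: fs, t :: ts => (t : Int) * (pvRes kv.1 : Int) + pvWres fs ts
  | _, _ => 0

def pvRsum : Nat → List Nat → Int
  | _, [] => 0
  | r, u :: us => (u : Int) * r + pvRsum (r + 1) us

theorem pv_res_lt (k : Int) : pvRes k < 10 := by
  have h1 := PySem.Int.mod_lt k (b := 10) (by norm_num)
  have h2 := PySem.Int.mod_nonneg k (b := 10) (by norm_num)
  unfold pvRes; omega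

theorem pv_res_cast (k : Int) : ((pvRes k : Nat) : Int) = PySem.Int.mod k 10 := by
  have h2 := PySem.Int.mod_nonneg k (b := 10) (by norm_num)
  unfold pvRes; omega

theorem pv_supsum_nonneg :
    ∀ (freq : List (Int × Int)), (∀ kv ∈ freq, 0 ≤ kv.2) → ∀ (r : Nat), 0 ≤ pvSupSum freq r := by
  intro freq
  induction freq with
  | nil => intro _ r; simp [pvSupSum]
  | cons kv fs ih =>
    intro hnn r
    have h1 : (0 : Int) ≤ kv.2 := hnn kv List.mem_cons_self
    have h2 := ih (fun x hx => hnn x (List.mem_cons_of_mem kv hx)) r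
    simp only [pvSupSum]
    split <;> omega

theorem pv_sum_map_range {M : Type} [AddCommMonoid M] (n : Nat) (f : Nat → M) :
    ((List.range n).map f).sum = ∑ i ∈ Finset.range n, f i := by
  induction n with
  | zero => simp
  | succ m ih => rw [Finset.sum_range_succ, List.range_succ]; simp [ih]

theorem pv_get_set_self (l : List Int) (i : Nat) (v : Int) (h : i < l.length) :
    (l.set i v)[i]! = v := by
  simp [h]

theorem pv_get_set_ne (l : List Int) (i j : Nat) (v : Int) (h : j < l.length) (hne : j ≠ i) :
    (l.set i v)[j]! = l[j]! := by
  rw [getElem!_pos (l.set i v) j (by simpa using h), getElem!_pos l j h,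
    List.getElem_set_ne (by omega)]

theorem pv_get_map_range {M : Type} [Inhabited M] (g : Nat → M) (n j : Nat) (h : j < n) :
    ((List.range n).map g)[j]! = g j := by
  rw [getElem!_pos _ j (by simpa using h)]
  simp

theorem pv_get_replicate (v : Int) (r : Nat) (h : r < 10) : (List.replicate 10 v)[r]! = v := by
  rw [getElem!_pos _ r (by simpa using h)]
  rw [List.getElem_replicate]

-- (a) the residue groups partition ts
theorem pv_gsum_total : ∀ (freq : List (Int × Int)) (ts : List Nat), pvFeas freq ts →
    ∑ r ∈ Finset.range 10, pvGsum freq ts r = ts.sum := by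
  intro freq
  induction freq with
  | nil => intro ts h; cases ts with
    | nil => simp [pvGsum]
    | cons t ts => simp [pvFeas] at h
  | cons kv fs ih =>
    intro ts h
    cases ts with
    | nil => simp [pvFeas] at h
    | cons t ts =>
      simp only [pvGsum, List.sum_cons]
      rw [Finset.sum_add_distrib, ih ts h.2, Finset.sum_ite_eq]
      simp [pv_res_lt kv.1]

-- (b1) weighted version, exact
theorem pv_gsum_weight : ∀ (freq : List (Int × Int)) (ts : List Nat), pvFeas freq ts →
    ∑ r ∈ Finset.range 10, ((pvGsum freq ts r : Int) * r) = pvWres freq ts := by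
  intro freq
  induction freq with
  | nil => intro ts h; cases ts with
    | nil => simp [pvGsum, pvWres]
    | cons t ts => simp [pvFeas] at h
  | cons kv fs ih =>
    intro ts h
    cases ts with
    | nil => simp [pvFeas] at h
    | cons t ts =>
      simp only [pvGsum, pvWres]
      have : ∀ r : Nat, (((if pvRes kv.1 = r then t else 0 : Nat) + pvGsum fs ts r : Nat) : Int) * r
          = (if pvRes kv.1 = r then (t : Int) * r else 0) + (pvGsum fs ts r : Int) * r := by
        intro r; split <;> push_cast <;> ring
      rw [Finset.sum_congr rfl (fun r _ => this r), Finset.sum_add_distrib, ih ts h.2,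
        Finset.sum_ite_eq]
      simp [pv_res_lt kv.1]

-- (b2) pvWsum and pvWres agree modulo 10
theorem pv_wsum_modeq : ∀ (freq : List (Int × Int)) (ts : List Nat),
    Int.ModEq 10 (pvWsum freq ts) (pvWres freq ts) := by
  intro freq
  induction freq with
  | nil => intro ts; cases ts <;> simp [pvWsum, pvWres]
  | cons kv fs ih =>
    intro ts
    cases ts with
    | nil => simp [pvWsum, pvWres]
    | cons t ts =>
      simp only [pvWsum, pvWres]
      have hk : Int.ModEq 10 kv.1 ((pvRes kv.1 : Nat) : Int) := by
        rw [pv_res_cast, PySem.Int.mod_eq_emod_of_pos (a := kv.1) (by norm_num)]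
        exact (Int.emod_emod kv.1 10).symm
      exact ((hk.mul_left (t : Int)).add (ih ts))

-- group sums are bounded by the group supply (counts ≥ 0)
theorem pv_gsum_le_supsum : ∀ (freq : List (Int × Int)) (ts : List Nat),
    pvFeas freq ts → (∀ kv ∈ freq, 0 ≤ kv.2) → ∀ r : Nat,
    (pvGsum freq ts r : Int) ≤ pvSupSum freq r := by
  intro freq
  induction freq with
  | nil => intro ts h hnn r; cases ts with
    | nil => simp [pvGsum, pvSupSum]
    | cons t ts => simp [pvFeas] at h
  | cons kv fs ih =>
    intro ts h hnn r
    cases ts with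
    | nil => simp [pvFeas] at h
    | cons t ts =>
      have hrec := ih ts h.2 (fun x hx => hnn x (List.mem_cons_of_mem kv hx)) r
      have hc : (0 : Int) ≤ kv.2 := hnn kv List.mem_cons_self
      have hhead : (t : Int) ≤ kv.2 := by rcases h.1 with hx | hx <;> omega
      simp only [pvGsum, pvSupSum]
      push_cast
      split <;> omega

-- pvRsum as an indexed sum
theorem pv_rsum_eq : ∀ (us : List Nat) (r : Nat),
    pvRsum r us = ∑ j ∈ Finset.range us.length, (us[j]! : Int) * (r + j) := by
  intro us
  induction us with
  | nil => intro r; simp [pvRsum]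
  | cons u us ih =>
    intro r
    simp only [pvRsum, List.length_cons]
    rw [Finset.sum_range_succ']
    simp only [List.getElem!_cons_succ, List.getElem!_cons_zero]
    rw [ih (r + 1)]
    have h2 := Finset.sum_congr rfl (fun j (_ : j ∈ Finset.range us.length) => by
      push_cast; ring :
      ∀ j ∈ Finset.range us.length, (us[j]! : Int) * ((r + 1 : Nat) + (j : Int)) = (us[j]! : Int) * ((r : Int) + ((j : Int) + 1)))
    rw [h2]
    push_cast
    ring

-- the accumulation loop adds per-residue group totals
theorem pv_supply_spec : ∀ (freq : List (Int × Int)) (acc : List Int),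
    acc.length = 10 →
    (freq.foldl (fun sup kv =>
        let r := (PySem.Int.mod kv.1 10).toNat
        sup.set r (sup[r]! + kv.2)) acc).length = 10 ∧
    ∀ r, r < 10 →
      (freq.foldl (fun sup kv =>
        let r := (PySem.Int.mod kv.1 10).toNat
        sup.set r (sup[r]! + kv.2)) acc)[r]! = acc[r]! + pvSupSum freq r := by
  intro freq
  induction freq with
  | nil =>
    intro acc hlen
    refine ⟨hlen, fun r hr => ?_⟩
    simp only [List.foldl_nil, pvSupSum]
    omega
  | cons kv fs ih =>
    intro acc hlen
    simp only [List.foldl_cons]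
    set ρ := (PySem.Int.mod kv.1 10).toNat with hρ
    have hρlt : ρ < 10 := pv_res_lt kv.1
    set acc' := acc.set ρ (acc[ρ]! + kv.2) with hacc'
    have hlen' : acc'.length = 10 := by simp [hacc', hlen]
    obtain ⟨hl2, hv2⟩ := ih acc' hlen'
    refine ⟨hl2, fun r hr => ?_⟩
    rw [hv2 r hr]
    have hcond : pvRes kv.1 = ρ := rfl
    by_cases hrρ : r = ρ
    · rw [hrρ, hacc', pv_get_set_self _ _ _ (by omega)]
      simp only [pvSupSum, hcond, if_pos]
      omega
    · rw [hacc', pv_get_set_ne _ _ _ _ (by omega) hrρ]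
      have hres : ¬ (pvRes kv.1 = r) := fun hcon => hrρ (by rw [← hcon]; rfl)
      simp only [pvSupSum, hres, if_false]
      omega

theorem pv_rsum_zero : ∀ (us : List Nat) (r : Nat), (∀ u ∈ us, u = 0) → pvRsum r us = 0 := by
  intro us
  induction us with
  | nil => intro r _; rfl
  | cons u us ih =>
    intro r h
    simp only [pvRsum]
    rw [h u List.mem_cons_self, ih (r + 1) (fun x hx => h x (List.mem_cons_of_mem u hx))]
    simp

-- what the pick loop searches: one group count per residue r..9
theorem pv_pick_char (supply : List Int) (target : Int) (hlen : supply.length = 10)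
    (hpos : ∀ j, j < 10 → (0 : Int) ≤ supply[j]!) :
    ∀ (m r : Nat), r + m = 10 → ∀ (k s : Int), 0 ≤ k →
    (pvPick supply target r k s = true ↔
      ∃ us : List Nat, us.length = m ∧ (∀ j, j < m → (us[j]! : Int) ≤ supply[r + j]!) ∧
        (us.sum : Int) = k ∧ PySem.Int.mod (s + pvRsum r us) 10 = target) := by
  intro m
  induction m with
  | zero =>
    intro r hr k s hk
    have hr10 : (10 : Nat) ≤ r := by omega
    rw [pvPick]
    by_cases hk0 : k = 0
    · subst hk0
      rw [if_pos rfl, decide_eq_true_eq]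
      constructor
      · intro h
        exact ⟨[], rfl, by omega, by simp, by simpa [pvRsum] using h⟩
      · rintro ⟨us, hl, _, _, hm⟩
        rw [List.length_eq_zero_iff.mp hl] at hm
        simpa [pvRsum] using hm
    · rw [if_neg hk0, dif_pos hr10]
      simp only [Bool.false_eq_true, false_iff]
      rintro ⟨us, hl, _, hs, _⟩
      rw [List.length_eq_zero_iff.mp hl] at hs
      simp at hs
      omega
  | succ m ih =>
    intro r hr k s hk
    rw [pvPick]
    by_cases hk0 : k = 0
    · subst hk0
      rw [if_pos rfl, decide_eq_true_eq]
      constructor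
      · intro h
        refine ⟨List.replicate (m + 1) 0, by simp, ?_, by simp, ?_⟩
        · intro j hj
          rw [getElem!_pos _ j (by simpa using hj), List.getElem_replicate]
          simpa using hpos (r + j) (by omega)
        · rw [pv_rsum_zero _ r (by simp)]
          simpa using h
      · rintro ⟨us, hl, _, hsum, hm⟩
        have hz : ∀ u ∈ us, u = 0 := by
          intro u hu
          have := List.le_sum_of_mem hu
          omega
        rw [pv_rsum_zero us r hz] at hm
        simpa using hm
    · have hr10 : ¬ 10 ≤ r := by omega
      rw [if_neg hk0, dif_neg hr10]
      rw [List.any_eq_true]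
      constructor
      · rintro ⟨t, htmem, hrec⟩
        rw [PySem.List.mem_pyRange_one] at htmem
        have ht0 : 0 ≤ t := htmem.1
        have htle : t ≤ min supply[r]! k := by omega
        have hk' : 0 ≤ k - t := by omega
        rw [ih (r + 1) (by omega) (k - t) (s + t * r) hk'] at hrec
        obtain ⟨us, hl, hbd, hsum, hm⟩ := hrec
        refine ⟨t.toNat :: us, by simp [hl], ?_, ?_, ?_⟩
        · intro j hj
          cases j with
          | zero =>
            rw [List.getElem!_cons_zero]
            simp only [Nat.add_zero]
            omega
          | succ j' =>
            rw [List.getElem!_cons_succ]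
            have := hbd j' (by omega)
            have harr : r + (j' + 1) = r + 1 + j' := by omega
            rw [harr]
            exact this
        · rw [List.sum_cons, Nat.cast_add, Int.toNat_of_nonneg ht0, hsum]
          ring
        · simp only [pvRsum]
          have ha : s + ((t.toNat : Int) * r + pvRsum (r + 1) us) = s + t * r + pvRsum (r + 1) us := by
            rw [Int.toNat_of_nonneg ht0]; ring
          rw [ha]
          exact hm
      · rintro ⟨us, hl, hbd, hsum, hm⟩
        cases us with
        | nil => simp at hl
        | cons u us' =>
          refine ⟨(u : Int), ?_, ?_⟩
          · rw [PySem.List.mem_pyRange_one]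
            have hb0 : (u : Int) ≤ supply[r]! := by
              have := hbd 0 (by omega)
              simpa using this
            have hule : (u : Int) ≤ k := by
              rw [List.sum_cons, Nat.cast_add] at hsum
              have h1 : (0 : Int) ≤ (us'.sum : Int) := by positivity
              omega
            omega
          · rw [ih (r + 1) (by omega) (k - u) (s + u * r) (by
              rw [List.sum_cons, Nat.cast_add] at hsum
              have h1 : (0 : Int) ≤ (us'.sum : Int) := by positivity
              omega)]
            refine ⟨us', by simpa using hl, ?_, ?_, ?_⟩
            · intro j hj
              have := hbd (j + 1) (by omega)
              rw [List.getElem!_cons_succ] at this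
              have harr : r + (j + 1) = r + 1 + j := by omega
              rw [harr] at this
              exact this
            · rw [List.sum_cons, Nat.cast_add] at hsum
              omega
            · simp only [pvRsum] at hm
              have ha : s + u * r + pvRsum (r + 1) us' = s + ((u : Int) * r + pvRsum (r + 1) us') := by ring
              rw [ha]
              exact hm

-- any per-residue demand below the supply splits into per-key counts below the counts
theorem pv_distr : ∀ (freq : List (Int × Int)) (f : Nat → Nat),
    (∀ kv ∈ freq, 0 ≤ kv.2) →
    (∀ r, r < 10 → (f r : Int) ≤ pvSupSum freq r) →
    ∃ ts : List Nat, pvFeas freq ts ∧ ∀ r, r < 10 → pvGsum freq ts r = f r := by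
  intro freq
  induction freq with
  | nil =>
    intro f _ hb
    refine ⟨[], trivial, fun r hr => ?_⟩
    have := hb r hr
    simp only [pvSupSum] at this
    simp only [pvGsum]
    omega
  | cons kv fs ih =>
    intro f hnn hb
    set ρ := pvRes kv.1 with hρ
    have hρlt : ρ < 10 := pv_res_lt kv.1
    have hcnn : (0 : Int) ≤ kv.2 := hnn kv List.mem_cons_self
    set t : Nat := min (f ρ) kv.2.toNat with ht
    have htle : (t : Int) ≤ kv.2 := by
      rw [ht]; push_cast; omega
    have hhead := hb ρ hρlt
    rw [show pvSupSum (kv :: fs) ρ = (if pvRes kv.1 = ρ then kv.2 else 0) + pvSupSum fs ρ from rfl,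
      if_pos rfl] at hhead
    set f' : Nat → Nat := fun r => if r = ρ then f ρ - t else f r with hf'
    have hb' : ∀ r, r < 10 → (f' r : Int) ≤ pvSupSum fs r := by
      intro r hr
      by_cases hrρ : r = ρ
      · rw [hrρ]
        simp only [hf', if_true]
        have hSnn := pv_supsum_nonneg fs (fun x hx => hnn x (List.mem_cons_of_mem kv hx)) ρ
        omega
      · simp only [hf', if_neg hrρ]
        have := hb r hr
        rw [show pvSupSum (kv :: fs) r = (if pvRes kv.1 = r then kv.2 else 0) + pvSupSum fs r from rfl,
          if_neg (by rw [← hρ]; exact fun hc => hrρ hc.symm)] at this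
        omega
    obtain ⟨ts', hfeas', hg'⟩ := ih f' (fun x hx => hnn x (List.mem_cons_of_mem kv hx)) hb'
    refine ⟨t :: ts', ⟨Or.inr htle, hfeas'⟩, fun r hr => ?_⟩
    rw [show pvGsum (kv :: fs) (t :: ts') r = (if pvRes kv.1 = r then t else 0) + pvGsum fs ts' r from rfl]
    by_cases hrρ : r = ρ
    · rw [hrρ, if_pos rfl, hg' ρ hρlt]
      simp only [hf', if_true]
      omega
    · rw [if_neg (by rw [← hρ]; exact fun hc => hrρ hc.symm), hg' r hr]
      simp only [hf', if_neg hrρ]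
      omega

theorem pv_self_map (us : List Nat) : us = (List.range us.length).map (fun j => us[j]!) := by
  apply List.ext_getElem
  · simp
  · intro i h1 h2
    rw [List.getElem_map, List.getElem_range, getElem!_pos us i h1]

theorem pv_mod_shift (summ X Y : Int) (h : Int.ModEq 10 X Y) :
    (PySem.Int.mod (summ + X) 10 = 3) ↔ (PySem.Int.mod (0 + Y) 10 = PySem.Int.mod (3 - summ) 10) := by
  rw [PySem.Int.mod_eq_emod_of_pos (by norm_num), PySem.Int.mod_eq_emod_of_pos (by norm_num),
    PySem.Int.mod_eq_emod_of_pos (by norm_num)]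
  unfold Int.ModEq at h
  omega

theorem pv_B_char (summ : Int) (freq : List (Int × Int)) (idx : Int)
    (h3 : idx ≤ 3) (hnn : ∀ kv ∈ freq, 0 ≤ kv.2) :
    (backtrack_alt summ freq idx = true ↔ pvGood freq (3 - idx).toNat summ) := by
  have hneed : (0 : Int) ≤ 3 - idx := by omega
  have heq : backtrack_alt summ freq idx =
      pvPick (freq.foldl (fun sup kv =>
          let r := (PySem.Int.mod kv.1 10).toNat
          sup.set r (sup[r]! + kv.2)) (List.replicate 10 0))
        (PySem.Int.mod (3 - summ) 10) 0 (3 - idx) 0 := rfl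
  rw [heq]
  obtain ⟨hslen, hsval⟩ := pv_supply_spec freq (List.replicate 10 0) (by simp)
  have hS : ∀ r, r < 10 →
      (freq.foldl (fun sup kv =>
        let r := (PySem.Int.mod kv.1 10).toNat
        sup.set r (sup[r]! + kv.2)) (List.replicate 10 0))[r]! = pvSupSum freq r := by
    intro r hr
    rw [hsval r hr, pv_get_replicate _ _ hr, zero_add]
  have hpos : ∀ j, j < 10 → (0 : Int) ≤
      (freq.foldl (fun sup kv =>
        let r := (PySem.Int.mod kv.1 10).toNat
        sup.set r (sup[r]! + kv.2)) (List.replicate 10 0))[j]! := by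
    intro j hj
    rw [hS j hj]
    exact pv_supsum_nonneg freq hnn j
  rw [pv_pick_char _ _ hslen hpos 10 0 rfl (3 - idx) 0 hneed]
  constructor
  · rintro ⟨us, hl10, hbd, hsum, hm⟩
    have hfb : ∀ r, r < 10 → ((us[r]! : Nat) : Int) ≤ pvSupSum freq r := by
      intro r hr
      have hb1 := hbd r hr
      rw [zero_add, hS r hr] at hb1
      exact hb1
    obtain ⟨ts, hfeas, hg⟩ := pv_distr freq (fun j => us[j]!) hnn hfb
    have hsum_ts : ts.sum = us.sum := by
      rw [← pv_gsum_total freq ts hfeas]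
      have hus : us.sum = ((List.range 10).map (fun j => us[j]!)).sum := by
        conv_lhs => rw [pv_self_map us]
        rw [hl10]
      rw [hus, pv_sum_map_range]
      exact Finset.sum_congr rfl (fun r hr => hg r (Finset.mem_range.mp hr))
    have hrs : pvRsum 0 us = pvWres freq ts := by
      rw [pv_rsum_eq us 0, hl10, ← pv_gsum_weight freq ts hfeas]
      refine Finset.sum_congr rfl (fun j hj => ?_)
      rw [hg j (Finset.mem_range.mp hj)]
      push_cast
      ring
    refine ⟨ts, hfeas, by omega, ?_⟩
    rw [pv_mod_shift summ (pvWsum freq ts) (pvRsum 0 us)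
      (by rw [hrs]; exact pv_wsum_modeq freq ts)]
    exact hm
  · rintro ⟨ts, hfeas, hsum, hm⟩
    refine ⟨(List.range 10).map (fun r => pvGsum freq ts r), by simp, ?_, ?_, ?_⟩
    · intro j hj
      rw [pv_get_map_range _ _ _ hj, zero_add, hS j hj]
      exact pv_gsum_le_supsum freq ts hfeas hnn j
    · have : ((List.range 10).map (fun r => pvGsum freq ts r)).sum = ts.sum := by
        rw [pv_sum_map_range]
        exact pv_gsum_total freq ts hfeas
      rw [this]
      omega
    · rw [← pv_mod_shift summ (pvWsum freq ts) _
        (by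
          have hrs : pvRsum 0 ((List.range 10).map (fun r => pvGsum freq ts r)) = pvWres freq ts := by
            rw [pv_rsum_eq _ 0, List.length_map, List.length_range, ← pv_gsum_weight freq ts hfeas]
            refine Finset.sum_congr rfl (fun j hj => ?_)
            rw [pv_get_map_range _ _ _ (Finset.mem_range.mp hj)]
            push_cast
            ring
          rw [hrs]
          exact pv_wsum_modeq freq ts)]
      exact hm

-- idx > 3: A exhausts its counts without reaching the base case (guard), and B's first
-- pick range is empty since the wanted number of picks is negative
theorem pv_B_gt (summ : Int) (freq : List (Int × Int)) (idx : Int)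
    (h3 : 3 < idx) (hnn : ∀ kv ∈ freq, 0 ≤ kv.2) :
    backtrack_alt summ freq idx = false := by
  have heq : backtrack_alt summ freq idx =
      pvPick (freq.foldl (fun sup kv =>
          let r := (PySem.Int.mod kv.1 10).toNat
          sup.set r (sup[r]! + kv.2)) (List.replicate 10 0))
        (PySem.Int.mod (3 - summ) 10) 0 (3 - idx) 0 := rfl
  rw [heq, pvPick]
  obtain ⟨hslen, hsval⟩ := pv_supply_spec freq (List.replicate 10 0) (by simp)
  have hs0 : (0 : Int) ≤
      (freq.foldl (fun sup kv =>
        let r := (PySem.Int.mod kv.1 10).toNat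
        sup.set r (sup[r]! + kv.2)) (List.replicate 10 0))[0]! := by
    rw [hsval 0 (by omega), pv_get_replicate _ _ (by omega), zero_add]
    exact pv_supsum_nonneg freq hnn 0
  rw [if_neg (by omega : ¬ (3 - idx) = 0), dif_neg (by omega : ¬ (10 : Nat) ≤ 0)]
  have hnil : PySem.List.pyRange 0
      (min (freq.foldl (fun sup kv =>
        let r := (PySem.Int.mod kv.1 10).toNat
        sup.set r (sup[r]! + kv.2)) (List.replicate 10 0))[0]! (3 - idx) + 1) 1 = [] := by
    rw [List.eq_nil_iff_forall_not_mem]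
    intro t ht
    rw [PySem.List.mem_pyRange_one] at ht
    omega
  rw [hnil]
  rfl

-- ===== VERDICT (by name: the statement is the Claim_ definition above) =====
theorem backtrack_spec : Claim_equal_backtrack := by
  intro summ freq idx _hd hpre
  obtain ⟨hnd, hnn⟩ := hpre
  unfold Spec_backtrack
  by_cases h3 : idx ≤ 3
  · have hA := pv_A_char (3 - idx).toNat summ freq idx h3 rfl hnd
    have hB := pv_B_char summ freq idx h3 hnn
    cases hAv : backtrack summ freq idx
    · cases hBv : backtrack_alt summ freq idx
      · rfl
      · exact absurd (hA.mpr (hB.mp hBv)) (by simp [hAv])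
    · exact (hB.mpr (hA.mp hAv)).symm
  · rw [pv_B_gt summ freq idx (by omega) hnn, backtrack]
    rw [dif_neg (by omega : ¬ idx = 3), dif_pos (by omega : 3 < idx)]
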